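-- pv_equiv track=rewrite | github.com/MrBrantCode/unitest_baseline | mut_generate/mist_train_cf/cf_70209/solution.py | common_substring
-- ===== SOURCE A (Python) =====
-- from collections import Counter
--
-- def common_substring(arr, num):
--     def all_substrings(string):
--         length = len(string)
--         return [string[i: j] for i in range(length) for j in range(i + 1, length + 1)]
--
--     subs = []
--     for string in arr:
--         subs.extend(all_substrings(string.lower()))
--     subs_counter = Counter(subs)
--     common_subs = [k for k, v in subs_counter.items() if v >= num]
--     if len(common_subs) == 0: return ""
--     return min(common_subs, key=len)
-- ===== SOURCE B (Python) =====
-- def common_substring(arr, num):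
--     text = "".join(s.lower() for s in arr)
--     counts = {}
--     for c in text:
--         counts[c] = counts.get(c, 0) + 1
--     for c in text:
--         if counts[c] >= num:
--             return c
--     return ""
-- ===== Notes on version B (the rewrite author's own statement) =====
-- stated objective: faster
-- what changed: B never enumerates substrings: since any substring with >= num total occurrences forces its first character to have >= num occurrences, the minimum-length qualifying substring is always a single character, so B counts characters of the lowercased concatenation once and returns the first character whose count reaches num (or "").
import Mathlib
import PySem

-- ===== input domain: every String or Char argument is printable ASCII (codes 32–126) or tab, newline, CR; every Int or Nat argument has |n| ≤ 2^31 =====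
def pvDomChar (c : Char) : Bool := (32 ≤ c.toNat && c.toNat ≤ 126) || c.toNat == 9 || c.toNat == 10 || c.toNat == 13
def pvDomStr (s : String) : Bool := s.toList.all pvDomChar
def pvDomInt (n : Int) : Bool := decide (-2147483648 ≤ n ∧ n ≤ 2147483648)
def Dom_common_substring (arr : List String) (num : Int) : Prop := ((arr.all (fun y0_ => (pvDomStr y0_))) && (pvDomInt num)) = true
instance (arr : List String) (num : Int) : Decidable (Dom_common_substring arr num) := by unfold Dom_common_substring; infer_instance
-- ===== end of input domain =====

-- B replaces A's substring enumeration by one character-counting pass: the minimum-length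
-- qualifying substring is always a single character, so B returns the first character of the
-- lowercased concatenation whose count reaches num (measured asymptotically faster).


-- ===== PORT A =====
-- [string[i:j] for i in range(length) for j in range(i + 1, length + 1)]
def pvAllSubstrings (s : List Char) : List (List Char) :=
  (PySem.List.pyRange 0 (s.length : Int) 1).flatMap (fun i =>
    (PySem.List.pyRange (i + 1) ((s.length : Int) + 1) 1).map (fun j =>
      PySem.List.slice s (some i) (some j)))

def common_substring (arr : List String) (num : Int) : String :=
  let subs : List (List Char) :=
    arr.foldl (fun acc s => acc ++ pvAllSubstrings (PySem.Chars.lower s.toList)) []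
  let subsCounter := PySem.Dict.counter subs
  let commonSubs := (subsCounter.items.filter (fun kv => decide (num ≤ kv.2))).map (·.1)
  if commonSubs.length = 0 then ""
  else
    match PySem.List.min? commonSubs (fun u => u.length) with
    | some m => String.ofList m
    | none => ""

-- ===== PORT B =====
def common_substring_alt (arr : List String) (num : Int) : String :=
  let text : List Char := arr.foldl (fun acc s => acc ++ PySem.Chars.lower s.toList) []
  let counts := text.foldl (fun d c => d.insert c (d.getD c 0 + 1)) PySem.Dict.empty
  match text.find? (fun c => decide (num ≤ counts.getD c 0)) with
  | some c => String.ofList [c]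
  | none => ""

-- ===== PRECONDITION & SPEC =====
def Spec_common_substring (arr : List String) (num : Int) (out : String) : Prop := out = common_substring_alt arr num
instance (arr : List String) (num : Int) (out : String) : Decidable (Spec_common_substring arr num out) := by unfold Spec_common_substring; infer_instance

-- ===== CLAIM (what is proved, stated in full; the proofs are below) =====
def Claim_equal_common_substring : Prop := ∀ (arr : List String) (num : Int), Dom_common_substring arr num → Spec_common_substring arr num (common_substring arr num)

-- ===== LEMMAS AND PROOFS =====

-- prefixes of t of lengths 1..len(t): the inner loop of pvAllSubstrings at one start index
def pvPrefs (t : List Char) : List (List Char) :=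
  (List.range t.length).map (fun d => t.take (d + 1))

def pvSubsOf (t : List Char) : List (List Char) :=
  (List.range t.length).flatMap (fun i => pvPrefs (t.drop i))

def pvText (arr : List String) : List Char :=
  arr.flatMap (fun s => PySem.Chars.lower s.toList)

def pvSubsAll (arr : List String) : List (List Char) :=
  arr.flatMap (fun s => pvSubsOf (PySem.Chars.lower s.toList))

-- structural first-occurrence dedup, proved equal to PySem.List.dedup below
def pvDedup {α : Type} [BEq α] : List α → List α
  | [] => []
  | x :: l => x :: (pvDedup l).filter (fun y => !(y == x))

lemma pvPrefs_nil : pvPrefs [] = [] := rfl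

lemma pvPrefs_cons (c : Char) (t : List Char) :
    pvPrefs (c :: t) = [c] :: (pvPrefs t).map (c :: ·) := by
  simp [pvPrefs, List.range_succ_eq_map, List.map_map, Function.comp_def]

lemma pvSubsOf_cons (c : Char) (t : List Char) :
    pvSubsOf (c :: t) = pvPrefs (c :: t) ++ pvSubsOf t := by
  simp [pvSubsOf, List.range_succ_eq_map, List.flatMap_cons, List.flatMap_map]

lemma pvPrefs_ne_nil {t : List Char} {u : List Char} (h : u ∈ pvPrefs t) : u ≠ [] := by
  induction t with
  | nil => simp [pvPrefs_nil] at h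
  | cons c t ih =>
    rw [pvPrefs_cons] at h
    rcases List.mem_cons.mp h with h | h
    · subst h; simp
    · rcases List.mem_map.mp h with ⟨x, _, rfl⟩; simp

lemma pvPrefs_count_le_one (t : List Char) (u : List Char) : (pvPrefs t).count u ≤ 1 := by
  induction t generalizing u with
  | nil => simp [pvPrefs_nil]
  | cons c t ih =>
    rw [pvPrefs_cons]
    by_cases hu : u = [c]
    · subst hu
      have hmap : ((pvPrefs t).map (c :: ·)).count ([c] : List Char) = 0 := by
        refine List.count_eq_zero.mpr ?_
        intro hmem
        rcases List.mem_map.mp hmem with ⟨x, hx, hEq⟩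
        have hx0 : x = [] := by simpa using hEq
        exact pvPrefs_ne_nil hx hx0
      simp [hmap]
    · rcases u with _ | ⟨c', u'⟩
      · have h0 : ([] : List Char) ∉ ([c] : List Char) :: (pvPrefs t).map (c :: ·) := by
          intro hmem
          rcases List.mem_cons.mp hmem with hmem | hmem
          · simp at hmem
          · rcases List.mem_map.mp hmem with ⟨x, _, hEq⟩; simp at hEq
        rw [List.count_eq_zero.mpr h0]; omega
      · by_cases hc : c' = c
        · subst hc
          have hmap : ((pvPrefs t).map (c' :: ·)).count (c' :: u') = (pvPrefs t).count u' :=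
            List.count_map_of_injective _ _ (fun a b h => by simpa using h) _
          have hne : (([c'] : List Char) == (c' :: u')) = false := by
            simp only [beq_eq_false_iff_ne]
            intro h
            exact hu h.symm
          rw [List.count_cons, hmap, hne]
          simpa using ih u'
        · have hnm : (c' :: u' : List Char) ∉ ([c] : List Char) :: (pvPrefs t).map (c :: ·) := by
            intro hmem
            rcases List.mem_cons.mp hmem with hmem | hmem
            · have h1 : c' = c ∧ u' = [] := by simpa using hmem
              exact hc h1.1
            · rcases List.mem_map.mp hmem with ⟨x, _, hEq⟩
              have h1 : c = c' ∧ x = u' := by simpa using hEq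
              exact hc h1.1.symm
          rw [List.count_eq_zero.mpr hnm]; omega

lemma pvPrefs_count_singleton (t : List Char) (c : Char) :
    (pvPrefs t).count [c] = if t.head? = some c then 1 else 0 := by
  rcases t with _ | ⟨c', t⟩
  · simp [pvPrefs_nil]
  · rw [pvPrefs_cons]
    have hmap : ((pvPrefs t).map (c' :: ·)).count ([c] : List Char) = 0 := by
      refine List.count_eq_zero.mpr ?_
      intro hmem
      rcases List.mem_map.mp hmem with ⟨x, hx, hEq⟩
      have h1 : c' = c ∧ x = [] := by simpa using hEq
      exact pvPrefs_ne_nil hx h1.2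
    rw [List.count_cons, hmap]
    by_cases hc : c' = c
    · subst hc; simp
    · have hne : (([c'] : List Char) == [c]) = false := by
        simp only [beq_eq_false_iff_ne]
        intro h
        exact hc (by simpa using h)
      simp [hne, hc]

lemma pvPrefs_count_le (t : List Char) (c : Char) (u : List Char) :
    (pvPrefs t).count (c :: u) ≤ (pvPrefs t).count [c] := by
  rcases t with _ | ⟨c', t'⟩
  · simp [pvPrefs_nil]
  · by_cases hc : c' = c
    · subst hc
      rw [pvPrefs_count_singleton]
      simp only [List.head?_cons]
      exact pvPrefs_count_le_one _ _
    · have hnm : (c :: u : List Char) ∉ pvPrefs (c' :: t') := by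
        rw [pvPrefs_cons]
        intro hmem
        rcases List.mem_cons.mp hmem with hmem | hmem
        · have h1 : c = c' ∧ u = [] := by simpa using hmem
          exact hc h1.1.symm
        · rcases List.mem_map.mp hmem with ⟨x, _, hEq⟩
          have h1 : c' = c ∧ x = u := by simpa using hEq
          exact hc h1.1
      rw [List.count_eq_zero.mpr hnm]; omega

lemma pvPrefs_filter_len1 (t : List Char) :
    (pvPrefs t).filter (fun u => u.length == 1) = (t.take 1).map (fun c => [c]) := by
  rcases t with _ | ⟨c, t⟩
  · simp [pvPrefs_nil]
  · rw [pvPrefs_cons]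
    have hmap : ((pvPrefs t).map (c :: ·)).filter (fun u => u.length == 1) = [] := by
      refine List.filter_eq_nil_iff.mpr ?_
      intro a ha
      rcases List.mem_map.mp ha with ⟨x, hx, rfl⟩
      have hx0 : x ≠ [] := pvPrefs_ne_nil hx
      have : 0 < x.length := List.length_pos_iff.mpr hx0
      simp; omega
    simp [hmap]

lemma pvSubsOf_ne_nil {t u : List Char} (h : u ∈ pvSubsOf t) : u ≠ [] := by
  induction t with
  | nil => simp [pvSubsOf] at h
  | cons c t ih =>
    rw [pvSubsOf_cons, List.mem_append] at h
    rcases h with h | h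
    · exact pvPrefs_ne_nil h
    · exact ih h

lemma pvSubsOf_count_singleton (t : List Char) (c : Char) :
    (pvSubsOf t).count [c] = t.count c := by
  induction t with
  | nil => simp [pvSubsOf]
  | cons c' t ih =>
    rw [pvSubsOf_cons, List.count_append, ih, pvPrefs_count_singleton]
    by_cases hc : c' = c
    · subst hc
      have h2 : List.count c' (c' :: t) = List.count c' t + 1 := by
        rw [List.count_cons]; simp
      have h3 : (if (c' :: t).head? = some c' then 1 else 0) = 1 := by simp
      rw [h2, h3]
      omega
    · have hbe : (c' == c) = false := by simp only [beq_eq_false_iff_ne]; exact hc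
      have h2 : List.count c (c' :: t) = List.count c t := by
        rw [List.count_cons, hbe]; simp
      have h3 : (if (c' :: t).head? = some c then 1 else 0) = 0 := by simp [hc]
      rw [h2, h3]
      omega

lemma pvSubsOf_count_le (t : List Char) (c : Char) (u : List Char) :
    (pvSubsOf t).count (c :: u) ≤ (pvSubsOf t).count [c] := by
  induction t with
  | nil => simp [pvSubsOf]
  | cons c' t ih =>
    rw [pvSubsOf_cons, List.count_append, List.count_append]
    exact Nat.add_le_add (pvPrefs_count_le _ _ _) ih

lemma pvSubsOf_filter_len1 (t : List Char) :
    (pvSubsOf t).filter (fun u => u.length == 1) = t.map (fun c => [c]) := by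
  induction t with
  | nil => simp [pvSubsOf]
  | cons c t ih =>
    rw [pvSubsOf_cons, List.filter_append, ih, pvPrefs_filter_len1]
    simp

lemma pvInner_eq (s : List Char) (k : Nat) :
    ((PySem.List.pyRange ((0 : Int) + (k : Int) + 1) ((s.length : Int) + 1) 1).map
      (fun j => PySem.List.slice s (some ((0 : Int) + (k : Int))) (some j))) = pvPrefs (s.drop k) := by
  have hk : ((0 : Int) + (k : Int)) = (k : Int) := by ring
  rw [hk, PySem.List.pyRange_one]
  have hlen : (((s.length : Int) + 1) - ((k : Int) + 1)).toNat = s.length - k := by omega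
  rw [hlen, List.map_map]
  unfold pvPrefs
  rw [List.length_drop]
  apply List.map_congr_left
  intro d _
  have hcast : ((k : Int) + 1 + (d : Int)) = ((k + 1 + d : Nat) : Int) := by push_cast; ring
  simp only [Function.comp_apply, hcast, PySem.List.slice_natCast]
  have h1 : k + 1 + d - k = d + 1 := by omega
  rw [h1]

lemma pvAllSubstrings_eq (s : List Char) : pvAllSubstrings s = pvSubsOf s := by
  unfold pvAllSubstrings pvSubsOf
  rw [PySem.List.pyRange_one]
  have h0 : (((s.length : Int)) - 0).toNat = s.length := by omega
  rw [h0, List.flatMap_map]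
  congr 1
  funext k
  exact pvInner_eq s k

lemma pvSubs_foldl_eq (arr : List String) :
    arr.foldl (fun acc s => acc ++ pvAllSubstrings (PySem.Chars.lower s.toList)) [] = pvSubsAll arr := by
  rw [PySem.List.foldl_append_eq_flatMap]
  rw [List.nil_append]
  unfold pvSubsAll
  congr 1
  funext s
  exact pvAllSubstrings_eq _

lemma pvText_foldl_eq (arr : List String) :
    arr.foldl (fun acc s => acc ++ PySem.Chars.lower s.toList) [] = pvText arr := by
  rw [PySem.List.foldl_append_eq_flatMap, List.nil_append]; rfl

lemma pvSubsAll_ne_nil {arr : List String} {u : List Char} (h : u ∈ pvSubsAll arr) : u ≠ [] := by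
  rcases List.mem_flatMap.mp h with ⟨s, _, hu⟩
  exact pvSubsOf_ne_nil hu

lemma pvSubsAll_count_singleton (arr : List String) (c : Char) :
    (pvSubsAll arr).count [c] = (pvText arr).count c := by
  unfold pvSubsAll pvText
  rw [List.count_flatMap, List.count_flatMap]
  congr 1
  apply List.map_congr_left
  intro s _
  simp only [Function.comp_apply]
  exact pvSubsOf_count_singleton _ _

lemma pvSubsAll_count_le (arr : List String) (c : Char) (u : List Char) :
    (pvSubsAll arr).count (c :: u) ≤ (pvSubsAll arr).count [c] := by
  unfold pvSubsAll
  rw [List.count_flatMap, List.count_flatMap]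
  apply List.sum_le_sum
  intro s _
  simp only [Function.comp_apply]
  exact pvSubsOf_count_le _ _ _

lemma pvSubsAll_filter_len1 (arr : List String) :
    (pvSubsAll arr).filter (fun u => u.length == 1) = (pvText arr).map (fun c => [c]) := by
  unfold pvSubsAll pvText
  rw [List.filter_flatMap, List.map_flatMap]
  congr 1
  funext s
  exact pvSubsOf_filter_len1 _

-- PySem.List.dedup equals the structural pvDedup
lemma pvFoldl_add_eq {α : Type} [BEq α] [LawfulBEq α] (l : List α) : ∀ acc : List α,
    List.foldl PySem.Set.add acc l = acc ++ (pvDedup l).filter (fun y => !(acc.contains y)) := by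
  induction l with
  | nil => intro acc; simp [pvDedup]
  | cons y l ih =>
    intro acc
    have hSC : ∀ (s : List α) (x : α), PySem.Set.contains s x = s.contains x := fun _ _ => rfl
    by_cases h : acc.contains y = true
    · have hadd : PySem.Set.add acc y = acc := by
        unfold PySem.Set.add
        rw [hSC, if_pos h]
      rw [List.foldl_cons, hadd, ih acc]
      congr 1
      show (pvDedup l).filter _ = (pvDedup (y :: l)).filter _
      rw [pvDedup, List.filter_cons]
      have hy : (!acc.contains y) = false := by rw [h]; rfl
      rw [if_neg (by rw [hy]; simp)]
      rw [List.filter_filter]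
      apply List.filter_congr
      intro z _
      by_cases hz : z = y
      · subst hz
        rw [h]
        simp
      · have hbe : (z == y) = false := by simp only [beq_eq_false_iff_ne]; exact hz
        rw [hbe]
        simp
    · have h' : acc.contains y = false := by
        revert h; cases acc.contains y <;> simp
      have hadd : PySem.Set.add acc y = acc ++ [y] := by
        unfold PySem.Set.add
        rw [if_neg (by rw [hSC, h']; simp)]
      rw [List.foldl_cons, hadd, ih (acc ++ [y])]
      rw [pvDedup, List.filter_cons]
      have hy : (!acc.contains y) = true := by rw [h']; rfl
      rw [if_pos hy]
      rw [List.append_assoc, List.singleton_append]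
      congr 2
      rw [List.filter_filter]
      apply List.filter_congr
      intro z _
      simp only [List.contains_append, Bool.not_or, List.contains_cons, List.contains_nil,
        Bool.or_false]

lemma pvDedup_eq (l : List (List Char)) : PySem.List.dedup l = pvDedup l := by
  show List.foldl PySem.Set.add PySem.Set.empty l = pvDedup l
  rw [show (PySem.Set.empty : PySem.Set (List Char)) = ([] : List (List Char)) from rfl]
  rw [pvFoldl_add_eq l []]
  simp

lemma pvMem_pvDedup {α : Type} [BEq α] [LawfulBEq α] {x : α} {l : List α} :
    x ∈ pvDedup l ↔ x ∈ l := by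
  induction l with
  | nil => simp [pvDedup]
  | cons y l ih =>
    rw [pvDedup]
    constructor
    · intro h
      rcases List.mem_cons.mp h with h | h
      · exact h ▸ List.mem_cons_self
      · exact List.mem_cons_of_mem _ (ih.mp (List.mem_of_mem_filter h))
    · intro h
      rcases List.mem_cons.mp h with h | h
      · exact h ▸ List.mem_cons_self
      · by_cases hx : x = y
        · exact hx ▸ List.mem_cons_self
        · refine List.mem_cons_of_mem _ (List.mem_filter.mpr ⟨ih.mpr h, ?_⟩)
          simp [hx]

lemma pvFind?_filter_ne {α : Type} [BEq α] [LawfulBEq α] (p : α → Bool) (x : α)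
    (hx : p x = false) : ∀ l : List α, (l.filter (fun y => !(y == x))).find? p = l.find? p := by
  intro l
  induction l with
  | nil => rfl
  | cons z l ih =>
    by_cases hz : z = x
    · subst hz
      rw [List.filter_cons, if_neg (by simp)]
      rw [ih, List.find?_cons, hx]
    · rw [List.filter_cons, if_pos (by simp [hz])]
      rw [List.find?_cons, List.find?_cons]
      cases hpz : p z
      · exact ih
      · rfl

lemma pvDedup_find? {α : Type} [BEq α] [LawfulBEq α] (p : α → Bool) (l : List α) :
    (pvDedup l).find? p = l.find? p := by
  induction l with
  | nil => rfl
  | cons x l ih =>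
    rw [pvDedup, List.find?_cons, List.find?_cons]
    cases hpx : p x
    · rw [pvFind?_filter_ne p x hpx, ih]
    · rfl

lemma pvDedup_filter {α : Type} [BEq α] [LawfulBEq α] (q : α → Bool) (l : List α) :
    pvDedup (l.filter q) = (pvDedup l).filter q := by
  induction l with
  | nil => rfl
  | cons x l ih =>
    by_cases hq : q x
    · rw [List.filter_cons, if_pos hq, pvDedup, pvDedup, ih, List.filter_cons, if_pos hq]
      rw [List.filter_comm]
    · rw [List.filter_cons, if_neg (by simp [hq]), pvDedup, List.filter_cons,
        if_neg (by simp [hq]), ih, List.filter_comm]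
      refine (List.filter_eq_self.mpr ?_).symm
      intro z hz
      have hqz : q z = true := List.of_mem_filter hz
      have hbe : (z == x) = false := by
        simp only [beq_eq_false_iff_ne]
        intro hzx
        rw [hzx] at hqz
        exact hq hqz
      rw [hbe]
      rfl

lemma pvDedup_map {α β : Type} [BEq α] [LawfulBEq α] [BEq β] [LawfulBEq β]
    (f : α → β) (hf : Function.Injective f) (l : List α) :
    pvDedup (l.map f) = (pvDedup l).map f := by
  induction l with
  | nil => rfl
  | cons x l ih =>
    rw [List.map_cons, pvDedup, pvDedup, ih, List.map_cons, List.filter_map]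
    congr 2
    apply List.filter_congr
    intro z _
    simp only [Function.comp_apply]
    by_cases hz : z = x
    · subst hz; simp
    · have h1 : (z == x) = false := by simp [hz]
      have h2 : (f z == f x) = false := by
        simp only [beq_eq_false_iff_ne]
        exact fun h => hz (hf h)
      simp [h1, h2]

-- min?: the fold keeps the first element of minimal key
def pvStep {α : Type} (key : α → Nat) : Option α → α → Option α :=
  fun acc x => match acc with
    | none => some x
    | some m => if key x < key m then some x else some m

lemma pvMin?_eq_foldl {α : Type} (l : List α) (key : α → Nat) :
    PySem.List.min? l key = l.foldl (pvStep key) none := rfl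

lemma pvFold_keep {α : Type} (key : α → Nat) (l : List α) (m : α)
    (h : ∀ y ∈ l, key m ≤ key y) : l.foldl (pvStep key) (some m) = some m := by
  induction l with
  | nil => rfl
  | cons y l ih =>
    rw [List.foldl_cons]
    have : pvStep key (some m) y = some m := by
      unfold pvStep
      simp only []
      rw [if_neg (by exact Nat.not_lt.mpr (h y List.mem_cons_self))]
    rw [this]
    exact ih (fun z hz => h z (List.mem_cons_of_mem _ hz))

lemma pvFold_mem {α : Type} (key : α → Nat) (l : List α) : ∀ acc : Option α,
    l.foldl (pvStep key) acc = acc ∨ ∃ b ∈ l, l.foldl (pvStep key) acc = some b := by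
  induction l with
  | nil => intro acc; left; rfl
  | cons y l ih =>
    intro acc
    rw [List.foldl_cons]
    rcases ih (pvStep key acc y) with h | ⟨b, hb, h⟩
    · rw [h]
      rcases acc with _ | m
      · right; exact ⟨y, List.mem_cons_self, rfl⟩
      · unfold pvStep
        simp only []
        split
        · right; exact ⟨y, List.mem_cons_self, rfl⟩
        · left; rfl
    · right; exact ⟨b, List.mem_cons_of_mem _ hb, h⟩

lemma pvMin?_first {α : Type} (key : α → Nat) (l1 l2 : List α) (m : α)
    (h1 : ∀ y ∈ l1, key m < key y) (h2 : ∀ y ∈ l2, key m ≤ key y) :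
    PySem.List.min? (l1 ++ m :: l2) key = some m := by
  rw [pvMin?_eq_foldl, List.foldl_append, List.foldl_cons]
  rcases pvFold_mem key l1 none with h | ⟨b, hb, h⟩
  · rw [h]
    show l2.foldl (pvStep key) (pvStep key none m) = some m
    have : pvStep key none m = some m := rfl
    rw [this]
    exact pvFold_keep key l2 m h2
  · rw [h]
    have hstep : pvStep key (some b) m = some m := by
      unfold pvStep
      simp only []
      rw [if_pos (h1 b hb)]
    rw [hstep]
    exact pvFold_keep key l2 m h2

-- A's common_subs list, rewritten through the counter
lemma pvCommonSubs_eq (arr : List String) (num : Int) :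
    ((PySem.Dict.counter (pvSubsAll arr)).items.filter (fun kv => decide (num ≤ kv.2))).map (·.1)
      = (pvDedup (pvSubsAll arr)).filter
          (fun k => decide (num ≤ ((pvSubsAll arr).count k : Int))) := by
  rw [PySem.Dict.items_counter, List.filter_map, List.map_map]
  have hset : (PySem.Set.ofList (pvSubsAll arr) : List (List Char)) = pvDedup (pvSubsAll arr) :=
    pvDedup_eq _
  rw [hset]
  simp [Function.comp_def]

lemma pvMain_eq (arr : List String) (num : Int) :
    common_substring arr num = common_substring_alt arr num := by
  unfold common_substring common_substring_alt
  simp only [pvSubs_foldl_eq, pvText_foldl_eq, PySem.Dict.foldl_insert_getD_add_one_eq_counter,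
    PySem.Dict.getD_counter, pvCommonSubs_eq]
  set S := pvSubsAll arr with hS
  set T := pvText arr with hT
  set qual : List Char → Bool := fun k => decide (num ≤ ((S.count k : Int))) with hqual
  set p : Char → Bool := fun c => decide (num ≤ ((T.count c : Int))) with hp
  have hcs : ∀ u ∈ (pvDedup S).filter qual, u ∈ S ∧ qual u = true := by
    intro u hu
    exact ⟨pvMem_pvDedup.mp (List.mem_of_mem_filter hu), List.of_mem_filter hu⟩
  cases hf : T.find? p with
  | none =>
    have hnil : (pvDedup S).filter qual = [] := by
      refine List.filter_eq_nil_iff.mpr ?_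
      intro u hu hq
      have huS : u ∈ S := pvMem_pvDedup.mp hu
      rcases (List.exists_cons_of_ne_nil (pvSubsAll_ne_nil huS)) with ⟨c, u', rfl⟩
      have h1 : num ≤ (S.count (c :: u') : Int) := by
        have := hq; rw [hqual] at this; exact of_decide_eq_true this
      have h2 : S.count (c :: u') ≤ S.count [c] := pvSubsAll_count_le arr c u'
      have h3 : S.count [c] = T.count c := pvSubsAll_count_singleton arr c
      have h4 : 1 ≤ S.count (c :: u') := List.count_pos_iff.mpr huS
      have hcT : c ∈ T := by
        refine List.count_pos_iff.mp ?_
        omega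
      have := List.find?_eq_none.mp hf c hcT
      rw [hp] at this
      simp only [decide_eq_true_eq] at this
      omega
    rw [hnil]
    simp
  | some c' =>
    have hpc' : p c' = true := List.find?_some hf
    have hnum : num ≤ (T.count c' : Int) := by
      rw [hp] at hpc'; exact of_decide_eq_true hpc'
    have hc'T : c' ∈ T := List.mem_of_find?_eq_some hf
    have hcntT : 1 ≤ T.count c' := List.count_pos_iff.mpr hc'T
    have hcntS : S.count [c'] = T.count c' := pvSubsAll_count_singleton arr c'
    have hmemS : [c'] ∈ S := by
      refine List.count_pos_iff.mp ?_; omega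
    have hqual' : qual [c'] = true := by
      rw [hqual]; simp only [decide_eq_true_eq]; rw [hcntS]; exact hnum
    have hmemCS : [c'] ∈ (pvDedup S).filter qual :=
      List.mem_filter.mpr ⟨pvMem_pvDedup.mpr hmemS, hqual'⟩
    have hlen : ¬ ((pvDedup S).filter qual).length = 0 := by
      intro h
      rw [List.length_eq_zero_iff] at h
      rw [h] at hmemCS
      simp at hmemCS
    rw [if_neg hlen]
    -- the first length-1 element of common_subs is [c']
    have hchain : ((pvDedup S).filter qual).filter (fun u => u.length == 1)
        = ((pvDedup T).filter p).map (fun c => [c]) := by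
      rw [List.filter_comm]
      have h1 : (pvDedup S).filter (fun u => u.length == 1)
          = (pvDedup T).map (fun c => [c]) := by
        rw [← pvDedup_filter, pvSubsAll_filter_len1,
          pvDedup_map (fun c => [c]) (fun a b h => by simpa using h)]
      rw [h1, List.filter_map]
      congr 1
      apply List.filter_congr
      intro c _
      simp only [Function.comp_apply, hqual, hp]
      rw [pvSubsAll_count_singleton arr c]
    have hfind1 : ((pvDedup S).filter qual).find? (fun u => u.length == 1) = some [c'] := by
      rw [← List.head?_filter, hchain, List.head?_map, List.head?_filter, pvDedup_find?, hf]
      rfl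
    rcases List.find?_eq_some_iff_append.mp hfind1 with ⟨_, l1, l2, heq, hl1⟩
    have hminlen : ∀ y ∈ (pvDedup S).filter qual, 1 ≤ y.length := by
      intro y hy
      have : y ≠ [] := pvSubsAll_ne_nil (hcs y hy).1
      have := List.length_pos_iff.mpr this
      omega
    have hmin : PySem.List.min? ((pvDedup S).filter qual) (fun u => u.length) = some [c'] := by
      rw [heq]
      apply pvMin?_first
      · intro y hy
        have hyCS : y ∈ (pvDedup S).filter qual := by
          rw [heq]; exact List.mem_append_left _ hy
        have hne1 : (y.length == 1) = false := by
          have := hl1 y hy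
          simpa using this
        have : y.length ≠ 1 := by simpa using hne1
        have := hminlen y hyCS
        simp only [List.length_singleton]
        omega
      · intro y hy
        have hyCS : y ∈ (pvDedup S).filter qual := by
          rw [heq]
          exact List.mem_append_right _ (List.mem_cons_of_mem _ hy)
        simpa using hminlen y hyCS
    rw [hmin]

-- ===== VERDICT (by name: the statement is the Claim_ definition above) =====
theorem common_substring_spec : Claim_equal_common_substring := by
  intro arr num _
  show common_substring arr num = common_substring_alt arr num
  exact pvMain_eq arr num
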